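-- pv_equiv track=rewrite | github.com/Anson008/Think_Python_Exercise | Exercise_13_4.py | diff_words
-- ===== SOURCE A (Python) =====
-- def in_bisect(t, word):
--     """ Take a sorted list and a target value and returns the index of the value
--         in the list if it’s there, or None if it’s not.
--     """
--     if len(t) == 0:
--         return False
--     i = len(t) // 2
--     if t[i] == word:
--         return True
--     if t[i] > word:
--         return in_bisect(t[:i], word)
--     else:
--         return in_bisect(t[i+1:], word)
--
-- def make_hist(t):
--     """ Take a list of words as parameter. Count the number of times each word is used
--         and return a dictionary with words as keys and number of times as values.
--     """
--     hist = {}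
--     for word in t:
--         hist[word] = hist.get(word, 0) + 1
--     return hist
--
-- def diff_words(w_book, w_list):
--     """ Take a list of words in a book and a word list as parameters.
--         Return the words that are in the book but not in the words list.
--
--         w_book, w_list: lists
--     """
--     t = []
--     for key in make_hist(w_book):
--         if in_bisect(w_list, key):
--             continue
--         else:
--             t.append(key)
--     return t
-- ===== SOURCE B (Python) =====
-- def _bin_contains(t, word):
--     """Iterative binary search over index bounds; same comparison order and
--     midpoint rule as A's recursive slicing search, but no list copies."""
--     lo, hi = 0, len(t)
--     while lo < hi:
--         mid = lo + (hi - lo) // 2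
--         if t[mid] == word:
--             return True
--         if t[mid] > word:
--             hi = mid
--         else:
--             lo = mid + 1
--     return False
--
-- def diff_words(w_book, w_list):
--     seen = set()
--     out = []
--     for key in w_book:
--         if key not in seen:
--             seen.add(key)
--             if not _bin_contains(w_list, key):
--                 out.append(key)
--     return out
-- ===== Notes on version B (the rewrite author's own statement) =====
-- stated objective: faster
-- what changed: Replaces the recursive slice-copying binary search with an iterative lo/hi index binary search (same midpoint and comparison order, so identical behaviour even on unsorted lists), and replaces the count-building histogram with a single seen-set pass that collects first occurrences directly.
import Mathlib
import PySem

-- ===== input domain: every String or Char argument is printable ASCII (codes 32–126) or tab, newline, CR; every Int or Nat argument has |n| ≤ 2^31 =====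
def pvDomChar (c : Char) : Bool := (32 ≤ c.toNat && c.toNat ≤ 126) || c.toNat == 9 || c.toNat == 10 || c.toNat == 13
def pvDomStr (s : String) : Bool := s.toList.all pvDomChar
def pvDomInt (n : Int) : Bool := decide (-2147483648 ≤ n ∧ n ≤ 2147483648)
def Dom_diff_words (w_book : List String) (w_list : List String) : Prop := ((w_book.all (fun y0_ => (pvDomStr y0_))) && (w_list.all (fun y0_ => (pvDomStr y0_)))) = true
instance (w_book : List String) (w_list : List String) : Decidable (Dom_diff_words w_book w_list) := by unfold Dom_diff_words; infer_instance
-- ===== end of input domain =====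

-- B replaces A's recursive slice-copying binary search by an iterative lo/hi index search and
-- A's counting histogram by a single seen-set pass; measurably faster (no slice copies).


-- ===== PORT A =====
-- in_bisect: A's recursive binary search over list slices. t[i] is always in range
-- (i = len t / 2 < len t when len t ≠ 0), so pyGetD's default is never used.
def in_bisect (t : List String) (word : String) : Bool :=
  if _h : t.length = 0 then false
  else
    let i : Nat := t.length / 2
    let x := PySem.List.pyGetD t (i : Int) ""
    if x == word then true
    else if word < x then  -- t[i] > word
      in_bisect (PySem.List.slice t none (some (i : Int))) word   -- t[:i]
    else
      in_bisect (PySem.List.slice t (some ((i : Int) + 1)) none) word   -- t[i+1:]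
termination_by t.length
decreasing_by
  · rw [PySem.List.slice_to_natCast]
    simp only [List.length_take]
    omega
  · have hc : ((t.length / 2 : Nat) : Int) + 1 = ((t.length / 2 + 1 : Nat) : Int) := by push_cast; ring
    rw [hc, PySem.List.slice_from_natCast]
    simp only [List.length_drop]
    omega

def make_hist (t : List String) : PySem.Dict String Int :=
  t.foldl (fun hist word => hist.insert word (hist.getD word 0 + 1)) PySem.Dict.empty

def diff_words (w_book : List String) (w_list : List String) : List String :=
  (make_hist w_book).keys.foldl
    (fun t key => if in_bisect w_list key then t else t ++ [key]) []

-- ===== PORT B =====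
-- _bin_contains's while-loop: recursion on hi - lo; t[mid] is always in range when lo < hi ≤ len t.
def bin_search_loop (t : List String) (word : String) (lo hi : Nat) : Bool :=
  if _h : lo < hi then
    let mid : Nat := lo + (hi - lo) / 2
    let x := PySem.List.pyGetD t (mid : Int) ""
    if x == word then true
    else if word < x then bin_search_loop t word lo mid
    else bin_search_loop t word (mid + 1) hi
  else false
termination_by hi - lo
decreasing_by
  · omega
  · omega

def diff_words_alt (w_book : List String) (w_list : List String) : List String :=
  (w_book.foldl
    (fun (acc : PySem.Set String × List String) key =>
      if PySem.Set.contains acc.1 key then acc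
      else (PySem.Set.add acc.1 key,
            if bin_search_loop w_list key 0 w_list.length then acc.2 else acc.2 ++ [key]))
    (PySem.Set.empty, [])).2

-- ===== PRECONDITION & SPEC =====
def Spec_diff_words (w_book : List String) (w_list : List String) (out : List String) : Prop := out = diff_words_alt w_book w_list
instance (w_book : List String) (w_list : List String) (out : List String) : Decidable (Spec_diff_words w_book w_list out) := by unfold Spec_diff_words; infer_instance

-- ===== CLAIM (what is proved, stated in full; the proofs are below) =====
def Claim_equal_diff_words : Prop := ∀ (w_book : List String) (w_list : List String), Dom_diff_words w_book w_list → Spec_diff_words w_book w_list (diff_words w_book w_list)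

-- ===== LEMMAS AND PROOFS =====

-- The iterative search on bounds [lo, hi) computes A's recursive search on the corresponding sublist.
theorem loop_eq_bisect (word : String) : ∀ (k : Nat) (t : List String) (lo hi : Nat),
    lo ≤ hi → hi ≤ t.length → hi - lo ≤ k →
    bin_search_loop t word lo hi = in_bisect ((t.drop lo).take (hi - lo)) word := by
  intro k
  induction k with
  | zero =>
    intro t lo hi hle hlen hk
    have h : hi = lo := by omega
    subst h
    rw [bin_search_loop, in_bisect]
    simp
  | succ k ih =>
    intro t lo hi hle hlen hk
    by_cases hlt : lo < hi
    · have hd2 : (hi - lo) / 2 < hi - lo := Nat.div_lt_self (by omega) (by omega)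
      have hslen : ((t.drop lo).take (hi - lo)).length = hi - lo := by
        simp only [List.length_take, List.length_drop]; omega
      rw [bin_search_loop, in_bisect]
      simp only [hlt, hslen, dif_pos, dif_neg (by omega : ¬ (hi - lo) = 0)]
      have hx : PySem.List.pyGetD (List.take (hi - lo) (List.drop lo t)) (((hi - lo) / 2 : Nat) : Int) ""
              = PySem.List.pyGetD t ((lo + (hi - lo) / 2 : Nat) : Int) "" := by
        simp only [PySem.List.pyGetD_natCast, List.getD_eq_getElem?_getD,
          List.getElem?_take_of_lt hd2, List.getElem?_drop]
      have hsl1 : PySem.List.slice (List.take (hi - lo) (List.drop lo t)) none (some (((hi - lo) / 2 : Nat) : Int))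
              = List.take (lo + (hi - lo) / 2 - lo) (List.drop lo t) := by
        rw [PySem.List.slice_to_natCast, List.take_take]
        congr 1
        omega
      have hc : (((hi - lo) / 2 : Nat) : Int) + 1 = (((hi - lo) / 2 + 1 : Nat) : Int) := by push_cast; ring
      have hsl2 : PySem.List.slice (List.take (hi - lo) (List.drop lo t)) (some ((((hi - lo) / 2 : Nat) : Int) + 1)) none
              = List.take (hi - (lo + (hi - lo) / 2 + 1)) (List.drop (lo + (hi - lo) / 2 + 1) t) := by
        rw [hc, PySem.List.slice_from_natCast, List.drop_take, List.drop_drop]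
        congr 1
        omega
      rw [hx, hsl1, hsl2]
      split_ifs with h1 h2
      · rfl
      · exact ih t lo (lo + (hi - lo) / 2) (by omega) (by omega) (by omega)
      · exact ih t (lo + (hi - lo) / 2 + 1) hi (by omega) (by omega) (by omega)
    · have h : hi = lo := by omega
      subst h
      rw [bin_search_loop, in_bisect]
      simp

theorem bisect_eq_loop (t : List String) (word : String) :
    in_bisect t word = bin_search_loop t word 0 t.length := by
  have h := loop_eq_bisect word t.length t 0 t.length (Nat.zero_le _) le_rfl (by omega)
  simpa using h.symm

theorem update_prefix : ∀ (l : List String) (s : PySem.Set String),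
    s <+: PySem.Set.update s l := by
  intro l
  induction l with
  | nil => intro s; simp [PySem.Set.update]
  | cons x l ih =>
    intro s
    have h1 : PySem.Set.update s (x :: l) = PySem.Set.update (PySem.Set.add s x) l := by
      simp [PySem.Set.update]
    rw [h1]
    refine List.IsPrefix.trans ?_ (ih (PySem.Set.add s x))
    by_cases hm : x ∈ s
    · rw [PySem.Set.add_of_mem hm]
    · rw [PySem.Set.add_of_not_mem hm]
      exact ⟨[x], rfl⟩

theorem fold_seen (w_list : List String) : ∀ (l : List String) (s : PySem.Set String) (out : List String),
    (l.foldl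
      (fun (acc : PySem.Set String × List String) key =>
        if PySem.Set.contains acc.1 key then acc
        else (PySem.Set.add acc.1 key,
              if bin_search_loop w_list key 0 w_list.length then acc.2 else acc.2 ++ [key]))
      (s, out)).2 =
    ((PySem.Set.update s l).drop s.length).foldl
      (fun o k => if bin_search_loop w_list k 0 w_list.length then o else o ++ [k]) out := by
  intro l
  induction l with
  | nil => intro s out; simp [PySem.Set.update]
  | cons x l ih =>
    intro s out
    have hupd : PySem.Set.update s (x :: l) = PySem.Set.update (PySem.Set.add s x) l := by
      simp [PySem.Set.update]
    by_cases hm : x ∈ s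
    · have hc : PySem.Set.contains s x = true := (PySem.Set.contains_iff s x).mpr hm
      have hadd : PySem.Set.add s x = s := PySem.Set.add_of_mem hm
      simp only [List.foldl_cons, hc, if_true, hupd, hadd]
      exact ih s out
    · have hc : PySem.Set.contains s x = false := by
        rw [Bool.eq_false_iff]
        intro h
        exact hm ((PySem.Set.contains_iff s x).mp h)
      have hadd : PySem.Set.add s x = s ++ [x] := PySem.Set.add_of_not_mem hm
      simp only [List.foldl_cons, hc, if_false, Bool.false_eq_true]
      rw [ih]
      rw [hupd, hadd]
      obtain ⟨e, he⟩ := update_prefix l (s ++ [x])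
      rw [← he, List.append_assoc]
      have h1 : (s ++ ([x] ++ e)).drop s.length = [x] ++ e := List.drop_left
      have h2 : (s ++ ([x] ++ e)).drop (s ++ [x]).length = e := by
        have h := (List.drop_left : ((s ++ [x]) ++ e).drop (s ++ [x]).length = e)
        rwa [List.append_assoc] at h
      rw [h1, h2]
      simp [List.foldl_cons]

-- ===== VERDICT (by name: the statement is the Claim_ definition above) =====
theorem diff_words_spec : Claim_equal_diff_words := by
  unfold Claim_equal_diff_words
  intro w_book w_list _
  unfold Spec_diff_words diff_words diff_words_alt make_hist
  rw [PySem.Dict.keys_foldl_insert, fold_seen]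
  simp only [PySem.Dict.keys_empty, PySem.Set.empty, List.length_nil, List.drop_zero,
    bisect_eq_loop]
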